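-- pv_equiv track=rewrite | github.com/adn770/nhc | nhc/core/game.py | edge_door_blocked_tiles
-- ===== SOURCE A (Python) =====
-- def edge_door_blocked_tiles(
--     x: int, y: int, door_side: str,
-- ) -> set[tuple[int, int]]:
--     """Return tiles to block FOV through a closed edge-door.
--
--     When the player stands on a closed door tile, a 3-tile-wide
--     virtual wall is placed in the door_side direction so that
--     diagonal shadowcasting rays cannot leak around a single
--     blocked tile into the room beyond.
--     """
--     if door_side == "north":
--         return {(x + d, y - 1) for d in (-1, 0, 1)}
--     if door_side == "south":
--         return {(x + d, y + 1) for d in (-1, 0, 1)}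
--     if door_side == "east":
--         return {(x + 1, y + d) for d in (-1, 0, 1)}
--     if door_side == "west":
--         return {(x - 1, y + d) for d in (-1, 0, 1)}
--     return set()
-- ===== SOURCE B (Python) =====
-- _DIRS = {"north": (0, -1), "south": (0, 1), "east": (1, 0), "west": (-1, 0)}
--
--
-- def edge_door_blocked_tiles(x, y, door_side):
--     """Scan the full 3x3 neighborhood and keep the tiles whose offset has
--     dot product 1 with the door direction's unit vector: exactly the
--     3-tile wall on that side."""
--     u = _DIRS.get(door_side)
--     if u is None:
--         return set()
--     ux, uy = u
--     return {
--         (x + dx, y + dy)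
--         for dx in (-1, 0, 1)
--         for dy in (-1, 0, 1)
--         if dx * ux + dy * uy == 1
--     }
-- ===== Notes on version B (the rewrite author's own statement) =====
-- stated objective: alternative
-- what changed: Instead of four branches each hard-coding its three tiles, B looks up the side's unit direction vector and scans the full 3x3 neighborhood, keeping the tiles whose offset has dot product 1 with that vector (a generate-and-filter geometric formulation).
import Mathlib
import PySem

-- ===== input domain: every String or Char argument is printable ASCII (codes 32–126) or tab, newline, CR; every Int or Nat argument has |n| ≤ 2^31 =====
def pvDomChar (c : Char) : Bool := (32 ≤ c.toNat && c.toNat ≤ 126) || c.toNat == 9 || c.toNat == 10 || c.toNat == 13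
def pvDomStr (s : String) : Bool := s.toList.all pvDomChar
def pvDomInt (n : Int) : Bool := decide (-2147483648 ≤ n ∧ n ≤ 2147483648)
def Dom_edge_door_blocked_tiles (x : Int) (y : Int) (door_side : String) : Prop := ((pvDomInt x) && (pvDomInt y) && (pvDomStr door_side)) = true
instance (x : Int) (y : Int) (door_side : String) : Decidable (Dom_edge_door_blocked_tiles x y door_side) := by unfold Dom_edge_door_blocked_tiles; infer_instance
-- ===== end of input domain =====

-- B drops A's four hard-coded branch comprehensions: it scans the full 3x3 neighborhood and keeps the tiles whose offset has dot product 1 with the door direction's unit vector (alternative decomposition, same cost).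


-- ===== PORT A =====
-- A: four-branch dispatch; each branch is a set comprehension over d in (-1, 0, 1)
def edge_door_blocked_tiles (x : Int) (y : Int) (door_side : String) : List (Int × Int) :=
  if door_side == "north" then
    PySem.Set.ofList (([-1, 0, 1] : List Int).map (fun d => (x + d, y - 1)))
  else if door_side == "south" then
    PySem.Set.ofList (([-1, 0, 1] : List Int).map (fun d => (x + d, y + 1)))
  else if door_side == "east" then
    PySem.Set.ofList (([-1, 0, 1] : List Int).map (fun d => (x + 1, y + d)))
  else if door_side == "west" then
    PySem.Set.ofList (([-1, 0, 1] : List Int).map (fun d => (x - 1, y + d)))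
  else []

-- ===== PORT B =====
-- B: look up the side's unit vector, then filter the 3x3 neighborhood by dot product = 1
def pvDirs : PySem.Dict String (Int × Int) :=
  PySem.Dict.mk [("north", (0, -1)), ("south", (0, 1)), ("east", (1, 0)), ("west", (-1, 0))]

def edge_door_blocked_tiles_alt (x : Int) (y : Int) (door_side : String) : List (Int × Int) :=
  match PySem.Dict.get? pvDirs door_side with
  | none => []
  | some (ux, uy) =>
      PySem.Set.ofList
        ((([-1, 0, 1] : List Int).flatMap (fun dx =>
          (([-1, 0, 1] : List Int).filterMap (fun dy =>
            if dx * ux + dy * uy == 1 then some (x + dx, y + dy) else none)))))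

-- ===== PRECONDITION & SPEC =====
def Spec_edge_door_blocked_tiles (x : Int) (y : Int) (door_side : String) (out : List (Int × Int)) : Prop := out = edge_door_blocked_tiles_alt x y door_side
instance (x : Int) (y : Int) (door_side : String) (out : List (Int × Int)) : Decidable (Spec_edge_door_blocked_tiles x y door_side out) := by unfold Spec_edge_door_blocked_tiles; infer_instance

-- ===== CLAIM (what is proved, stated in full; the proofs are below) =====
def Claim_equal_edge_door_blocked_tiles : Prop := ∀ (x : Int) (y : Int) (door_side : String), Dom_edge_door_blocked_tiles x y door_side → Spec_edge_door_blocked_tiles x y door_side (edge_door_blocked_tiles x y door_side)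

-- ===== LEMMAS AND PROOFS =====

-- ===== VERDICT (by name: the statement is the Claim_ definition above) =====
theorem edge_door_blocked_tiles_spec : Claim_equal_edge_door_blocked_tiles := by
  intro x y ds _
  unfold Spec_edge_door_blocked_tiles edge_door_blocked_tiles edge_door_blocked_tiles_alt
  by_cases h1 : ds = "north"
  · subst h1
    have h : PySem.Dict.get? pvDirs "north" = some (0, -1) := rfl
    rw [h]; simp only [List.flatMap_cons, List.flatMap_nil, List.filterMap_cons, List.filterMap_nil]
    norm_num [Int.sub_eq_add_neg]
  by_cases h2 : ds = "south"
  · subst h2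
    have h : PySem.Dict.get? pvDirs "south" = some (0, 1) := rfl
    rw [h]; simp only [List.flatMap_cons, List.flatMap_nil, List.filterMap_cons, List.filterMap_nil]
    norm_num [Int.sub_eq_add_neg, if_neg h1]
  by_cases h3 : ds = "east"
  · subst h3
    have h : PySem.Dict.get? pvDirs "east" = some (1, 0) := rfl
    rw [h]; simp only [List.flatMap_cons, List.flatMap_nil, List.filterMap_cons, List.filterMap_nil]
    norm_num [Int.sub_eq_add_neg, if_neg h1, if_neg h2]
  by_cases h4 : ds = "west"
  · subst h4
    have h : PySem.Dict.get? pvDirs "west" = some (-1, 0) := rfl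
    rw [h]; simp only [List.flatMap_cons, List.flatMap_nil, List.filterMap_cons, List.filterMap_nil]
    norm_num [Int.sub_eq_add_neg, if_neg h1, if_neg h2, if_neg h3]
  have h : PySem.Dict.get? pvDirs ds = none := by
    simp [pvDirs, PySem.Dict.get?, Ne.symm h1, Ne.symm h2, Ne.symm h3, Ne.symm h4]
  rw [h]; simp [h1, h2, h3, h4]
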